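-- pv_equiv track=rewrite | github.com/Sigumaa/Excellm | src/excelmd/render_html.py | _split_hf_sections
-- ===== SOURCE A (Python) =====
-- def _split_hf_sections(raw: str) -> dict[str, str]:
--     sections = {"L": "", "C": "", "R": ""}
--     current = "C"
--     i = 0
--     while i < len(raw):
--         if raw[i] == "&" and i + 1 < len(raw) and raw[i + 1] in {"L", "C", "R"}:
--             current = raw[i + 1]
--             i += 2
--             continue
--         sections[current] += raw[i]
--         i += 1
--     return sections
-- ===== SOURCE B (Python) =====
-- def _split_hf_sections(raw: str) -> dict[str, str]:
--     sections = {"L": "", "C": "", "R": ""}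
--     parts = raw.split("&")
--     current = "C"
--     sections["C"] += parts[0]
--     for p in parts[1:]:
--         if p and p[0] in "LCR":
--             current = p[0]
--             sections[current] += p[1:]
--         else:
--             sections[current] += "&" + p
--     return sections
-- ===== Notes on version B (the rewrite author's own statement) =====
-- stated objective: idiomatic
-- what changed: Instead of a per-character index loop that tests every position for a section marker, B splits the string once on the ampersand separator and then makes one pass over the segments: the leading segment stays in the centre section, and each later segment either switches the current section on a leading marker letter or is re-glued with a literal separator.
import Mathlib
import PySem

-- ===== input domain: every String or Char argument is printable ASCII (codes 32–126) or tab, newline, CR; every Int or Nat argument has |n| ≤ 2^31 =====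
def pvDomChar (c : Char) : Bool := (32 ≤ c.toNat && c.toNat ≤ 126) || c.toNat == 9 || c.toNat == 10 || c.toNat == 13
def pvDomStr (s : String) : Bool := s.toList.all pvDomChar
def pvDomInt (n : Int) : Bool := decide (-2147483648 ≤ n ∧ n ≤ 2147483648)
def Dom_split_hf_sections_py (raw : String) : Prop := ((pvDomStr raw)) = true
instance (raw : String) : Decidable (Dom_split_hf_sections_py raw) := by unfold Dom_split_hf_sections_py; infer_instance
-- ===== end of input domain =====

-- B replaces A's per-character marker scan by a single split on the ampersand separator
-- followed by one pass over the segments (leading segment to the centre section; a segment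
-- switches section on a leading marker letter, otherwise the separator is re-glued literally).


-- ===== PORT A =====
-- `raw[i + 1] in {"L", "C", "R"}`
def pvLCR (c : Char) : Bool := c == 'L' || c == 'C' || c == 'R'

-- A's while loop over the index i, as recursion over the remaining characters:
-- the two-character case is `raw[i] == "&" and i + 1 < len(raw) and raw[i+1] in {...}`,
-- the one-character case is the loop body with the `i + 1 < len(raw)` test false.
def pvGoA : List Char → PySem.Dict String String → String → PySem.Dict String String
  | [], sections, _ => sections
  | [c], sections, current => sections.modify current "" (· ++ c.toString)
  | c :: d :: rest, sections, current =>
      if c == '&' && pvLCR d then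
        pvGoA rest sections d.toString
      else
        pvGoA (d :: rest) (sections.modify current "" (· ++ c.toString)) current

def split_hf_sections_py (raw : String) : List (String × String) :=
  (pvGoA raw.toList (PySem.Dict.ofList [("L", ""), ("C", ""), ("R", "")]) "C").items

-- ===== PORT B =====
-- hand port of Python's str.split("&") (single-character separator, exact):
-- "".split("&") == [""], and each '&' starts a new (initially empty) part.
def pvSplitAmp : List Char → List (List Char)
  | [] => [[]]
  | c :: cs => if c == '&' then [] :: pvSplitAmp cs else (pvSplitAmp cs).modifyHead (c :: ·)

-- the `for p in parts[1:]` loop: `if p and p[0] in "LCR"` switches and appends p[1:],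
-- else appends "&" + p to the current section.
def pvGoB : List (List Char) → PySem.Dict String String → String → PySem.Dict String String
  | [], sections, _ => sections
  | [] :: ps, sections, current =>
      pvGoB ps (sections.modify current "" (· ++ String.ofList ['&'])) current
  | (d :: t) :: ps, sections, current =>
      if pvLCR d then
        pvGoB ps (sections.modify d.toString "" (· ++ String.ofList t)) d.toString
      else
        pvGoB ps (sections.modify current "" (· ++ String.ofList ('&' :: d :: t))) current

def split_hf_sections_py_alt (raw : String) : List (String × String) :=
  let parts := pvSplitAmp raw.toList
  (pvGoB parts.tail
    ((PySem.Dict.ofList [("L", ""), ("C", ""), ("R", "")]).modify "C" ""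
      (· ++ String.ofList parts.headI)) "C").items

-- ===== PRECONDITION & SPEC =====
def Spec_split_hf_sections_py (raw : String) (out : List (String × String)) : Prop := out = split_hf_sections_py_alt raw
instance (raw : String) (out : List (String × String)) : Decidable (Spec_split_hf_sections_py raw out) := by unfold Spec_split_hf_sections_py; infer_instance

-- ===== CLAIM (what is proved, stated in full; the proofs are below) =====
def Claim_equal_split_hf_sections_py : Prop := ∀ (raw : String), Dom_split_hf_sections_py raw → Spec_split_hf_sections_py raw (split_hf_sections_py raw)

-- ===== LEMMAS AND PROOFS =====

-- the section dicts reachable in either port: the three fixed keys in fixed order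
def pvIsMk3 (s : PySem.Dict String String) : Prop :=
  ∃ l c r, s = PySem.Dict.mk [("L", l), ("C", c), ("R", r)]

theorem pvModL (l c r : String) (f : String → String) :
    (PySem.Dict.mk [("L", l), ("C", c), ("R", r)]).modify "L" "" f
      = PySem.Dict.mk [("L", f l), ("C", c), ("R", r)] := rfl

theorem pvModC (l c r : String) (f : String → String) :
    (PySem.Dict.mk [("L", l), ("C", c), ("R", r)]).modify "C" "" f
      = PySem.Dict.mk [("L", l), ("C", f c), ("R", r)] := rfl

theorem pvModR (l c r : String) (f : String → String) :
    (PySem.Dict.mk [("L", l), ("C", c), ("R", r)]).modify "R" "" f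
      = PySem.Dict.mk [("L", l), ("C", c), ("R", f r)] := rfl

theorem pvIsMk3_mod (s : PySem.Dict String String) (k x : String)
    (hs : pvIsMk3 s) (hk : k = "L" ∨ k = "C" ∨ k = "R") :
    pvIsMk3 (s.modify k "" (· ++ x)) := by
  obtain ⟨l, c, r, rfl⟩ := hs
  rcases hk with rfl | rfl | rfl
  · rw [pvModL]; exact ⟨_, _, _, rfl⟩
  · rw [pvModC]; exact ⟨_, _, _, rfl⟩
  · rw [pvModR]; exact ⟨_, _, _, rfl⟩

theorem pvApp_nil (s : PySem.Dict String String) (k : String)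
    (hs : pvIsMk3 s) (hk : k = "L" ∨ k = "C" ∨ k = "R") :
    s.modify k "" (· ++ "") = s := by
  obtain ⟨l, c, r, rfl⟩ := hs
  rcases hk with rfl | rfl | rfl
  · rw [pvModL]; simp
  · rw [pvModC]; simp
  · rw [pvModR]; simp

theorem pvApp_app (s : PySem.Dict String String) (k x y : String)
    (hs : pvIsMk3 s) (hk : k = "L" ∨ k = "C" ∨ k = "R") :
    (s.modify k "" (· ++ x)).modify k "" (· ++ y) = s.modify k "" (· ++ (x ++ y)) := by
  obtain ⟨l, c, r, rfl⟩ := hs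
  rcases hk with rfl | rfl | rfl
  · rw [pvModL, pvModL, pvModL, String.append_assoc]
  · rw [pvModC, pvModC, pvModC, String.append_assoc]
  · rw [pvModR, pvModR, pvModR, String.append_assoc]

theorem pvLCR_cases (d : Char) (h : pvLCR d = true) :
    d.toString = "L" ∨ d.toString = "C" ∨ d.toString = "R" := by
  simp only [pvLCR, Bool.or_eq_true, beq_iff_eq] at h
  rcases h with (h | h) | h <;> subst h
  · exact Or.inl rfl
  · exact Or.inr (Or.inl rfl)
  · exact Or.inr (Or.inr rfl)

theorem pvLCR_ne_amp (d : Char) (h : pvLCR d = true) : ¬ (d == '&') = true := by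
  simp only [pvLCR, Bool.or_eq_true, beq_iff_eq] at h ⊢
  rcases h with (h | h) | h <;> subst h <;> decide

theorem pvSplitAmp_ne_nil (cs : List Char) : pvSplitAmp cs ≠ [] := by
  induction cs with
  | nil => rw [pvSplitAmp]; simp
  | cons c cs ih =>
    rw [pvSplitAmp]
    split
    · simp
    · cases h : pvSplitAmp cs with
      | nil => exact absurd h ih
      | cons p ps => simp

theorem pvSplitAmp_cons (cs : List Char) : ∃ p ps, pvSplitAmp cs = p :: ps := by
  cases h : pvSplitAmp cs with
  | nil => exact absurd h (pvSplitAmp_ne_nil cs)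
  | cons p ps => exact ⟨p, ps, rfl⟩

theorem pvMkApp (a b : List Char) : String.ofList a ++ String.ofList b = String.ofList (a ++ b) := by
  rw [String.ofList_append]

theorem pvToStringMk (c : Char) : c.toString = String.ofList [c] := rfl

theorem pvBridge : ∀ (cs : List Char) (s : PySem.Dict String String) (cur : String)
    (p : List Char) (ps : List (List Char)),
    pvIsMk3 s → (cur = "L" ∨ cur = "C" ∨ cur = "R") → pvSplitAmp cs = p :: ps →
    pvGoA cs s cur = pvGoB ps (s.modify cur "" (· ++ String.ofList p)) cur
  | [], s, cur, p, ps, hs, hcur, hsplit => by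
    rw [pvSplitAmp] at hsplit
    injection hsplit with hp hps
    subst hp; subst hps
    rw [pvGoA, pvGoB]
    exact (pvApp_nil s cur hs hcur).symm
  | [c], s, cur, p, ps, hs, hcur, hsplit => by
    rw [pvSplitAmp, pvSplitAmp] at hsplit
    by_cases h : (c == '&') = true
    · rw [if_pos h] at hsplit
      injection hsplit with hp hps
      subst hp; subst hps
      rw [pvGoA, pvGoB, pvGoB, pvApp_nil s cur hs hcur]
      have hc : c = '&' := by simpa using h
      subst hc
      rfl
    · rw [if_neg h] at hsplit
      simp only [List.modifyHead] at hsplit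
      injection hsplit with hp hps
      subst hp; subst hps
      rw [pvGoA, pvGoB, pvToStringMk]
  | c1 :: c2 :: rest, s, cur, p, ps, hs, hcur, hsplit => by
    obtain ⟨p2, ps2, hsplit2⟩ := pvSplitAmp_cons (c2 :: rest)
    by_cases h1 : (c1 == '&') = true
    · have hc1 : c1 = '&' := by simpa using h1
      subst hc1
      rw [pvSplitAmp, if_pos h1, hsplit2] at hsplit
      injection hsplit with hp hps
      subst hp; subst hps
      by_cases h2 : pvLCR c2 = true
      · -- marker: switch the current section
        obtain ⟨p3, ps3, hsplit3⟩ := pvSplitAmp_cons rest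
        have hc2 : pvSplitAmp (c2 :: rest) = (c2 :: p3) :: ps3 := by
          rw [pvSplitAmp, if_neg (pvLCR_ne_amp c2 h2), hsplit3]
          rfl
        rw [hc2] at hsplit2
        injection hsplit2 with hp2 hps2
        subst hp2; subst hps2
        rw [pvGoA, if_pos (by simp [h2]), pvGoB, if_pos h2, pvApp_nil s cur hs hcur]
        exact pvBridge rest s c2.toString p3 ps3 hs (pvLCR_cases c2 h2) hsplit3
      · -- literal '&': appended to the current section
        have hgoal := pvBridge (c2 :: rest) (s.modify cur "" (· ++ "&")) cur p2 ps2
          (pvIsMk3_mod s cur "&" hs hcur) hcur hsplit2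
        rw [pvApp_app s cur "&" (String.ofList p2) hs hcur] at hgoal
        rw [pvGoA, if_neg (by simp [h2]), pvApp_nil s cur hs hcur]
        have hA : pvGoA (c2 :: rest) (s.modify cur "" (· ++ '&'.toString)) cur
            = pvGoB ps2 (s.modify cur "" (· ++ ("&" ++ String.ofList p2))) cur := hgoal
        rw [hA]
        by_cases hc2 : (c2 == '&') = true
        · -- next part is empty
          have : pvSplitAmp (c2 :: rest) = [] :: pvSplitAmp rest := by
            rw [pvSplitAmp, if_pos hc2]
          rw [this] at hsplit2
          injection hsplit2 with hp2 hps2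
          subst hp2
          rw [pvGoB]
          rfl
        · -- next part starts with a non-marker character
          obtain ⟨p3, ps3, hsplit3⟩ := pvSplitAmp_cons rest
          have : pvSplitAmp (c2 :: rest) = (c2 :: p3) :: ps3 := by
            rw [pvSplitAmp, if_neg hc2, hsplit3]
            rfl
          rw [this] at hsplit2
          injection hsplit2 with hp2 hps2
          subst hp2; subst hps2
          rw [pvGoB, if_neg h2]
          rw [show ("&" ++ String.ofList (c2 :: p3)) = String.ofList ('&' :: c2 :: p3) from
            pvMkApp ['&'] (c2 :: p3)]
    · -- ordinary character: appended to the current section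
      rw [pvSplitAmp, if_neg h1, hsplit2] at hsplit
      simp only [List.modifyHead] at hsplit
      injection hsplit with hp hps
      subst hp; subst hps
      have hgoal := pvBridge (c2 :: rest) (s.modify cur "" (· ++ c1.toString)) cur p2 ps2
        (pvIsMk3_mod s cur c1.toString hs hcur) hcur hsplit2
      rw [pvApp_app s cur c1.toString (String.ofList p2) hs hcur] at hgoal
      rw [pvGoA, if_neg (by simp [h1]), hgoal, pvToStringMk, pvMkApp]
      rfl
  termination_by cs => cs.length

-- ===== VERDICT (by name: the statement is the Claim_ definition above) =====
theorem split_hf_sections_py_spec : Claim_equal_split_hf_sections_py := by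
  intro raw _
  unfold Spec_split_hf_sections_py split_hf_sections_py split_hf_sections_py_alt
  obtain ⟨p, ps, hsplit⟩ := pvSplitAmp_cons raw.toList
  simp only [hsplit, List.tail_cons, List.headI]
  rw [pvBridge raw.toList (PySem.Dict.ofList [("L", ""), ("C", ""), ("R", "")]) "C" p ps
    ⟨"", "", "", rfl⟩ (Or.inr (Or.inl rfl)) hsplit]
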